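-- pv_equiv track=rewrite | github.com/liuyueyi/python-task-engine | src/plugins/encrypt/AEScoder.py | parse_key_to_index
-- ===== SOURCE A (Python) =====
-- def parse_key_to_index(key, return_list=True):
--     """
--     将密钥解析为下标
--     - key的排序规则：
--         - key拆分为字符数组，根据ASCII码升序排列
--         - 每个字符对应的数字，根据上面排序的下标来确定（如果一个字符存在多个下标时，采用队列规则，第一个出现的字符对应最后一个下标）
--             - 举例说明: key = 62ef0cf8
--             - 排序之后: 0 2 6 8 c e f f；
--             - 字符下标: 0 -> 0;  2 -> 1;  6 -> 2;  8 -> 3;  c -> 4; e -> 5; f -> 6,7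
--             - 排序规则: 62ef0cf8 -> 21570463
--     :param key:
--     :param return_list:
--     :return:
--     """
--     key_list = list(key)
--     key_list.sort()
--     mapper = {}
--     index = -1
--     for k in key_list:
--         index = index + 1
--         if k in mapper:
--             mapper[k].append(index)
--         else:
--             mapper[k] = [index]
--
--     if return_list:
--         result = []
--         for a in key:
--             result.append(mapper[a].pop())
--     else:
--         result = {}
--         index = 0
--         for a in key:
--             # key 为块真实地址， value为下标； 解密时使用
--             result[mapper[a].pop()] = index
--             index += 1
--
--     return result
-- ===== SOURCE B (Python) =====
-- def parse_key_to_index(key, return_list=True):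
--     # rank of position i = (# chars smaller than key[i]) + (# equal chars after i);
--     # no sort: count smaller chars once per distinct char, count later equals right-to-left
--     smaller = {}
--     for a in set(key):
--         smaller[a] = sum(1 for c in key if c < a)
--     ranks = []
--     seen = {}
--     for a in reversed(key):
--         k = seen.get(a, 0)
--         ranks.append(smaller[a] + k)
--         seen[a] = k + 1
--     ranks.reverse()
--     if return_list:
--         return ranks
--     return {ranks[i]: i for i in range(len(ranks))}
-- ===== Notes on version B (the rewrite author's own statement) =====
-- stated objective: alternative
-- what changed: B drops A's sort + per-char index-bucket dict + pop()-from-end bookkeeping: it computes each rank directly as (# characters smaller than key[i]) + (# equal characters after i), via one smaller-count per distinct character and a right-to-left seen-counter pass.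
-- outside the precondition, e.g. on parse_key_to_index('ab', False): A returns {0: 0, 1: 1}, B returns {0: 0, 1: 1}
import Mathlib
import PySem

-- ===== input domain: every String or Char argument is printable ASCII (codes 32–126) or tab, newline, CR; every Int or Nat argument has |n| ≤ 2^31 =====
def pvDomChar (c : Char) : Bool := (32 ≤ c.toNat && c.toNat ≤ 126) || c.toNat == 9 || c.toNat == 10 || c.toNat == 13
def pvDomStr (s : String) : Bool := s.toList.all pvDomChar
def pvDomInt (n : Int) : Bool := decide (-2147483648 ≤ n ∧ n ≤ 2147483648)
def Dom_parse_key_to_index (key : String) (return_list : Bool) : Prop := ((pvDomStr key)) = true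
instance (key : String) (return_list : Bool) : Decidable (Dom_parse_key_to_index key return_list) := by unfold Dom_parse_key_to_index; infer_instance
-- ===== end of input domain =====

-- B computes each sorted-index rank by direct counting (smaller chars + later equal chars)
-- instead of A's sort/bucket-dict/pop bookkeeping: simpler, no dict, no sort.


-- ===== PORT A =====
def parse_key_to_index (key : String) (return_list : Bool) : List Int :=
  let key_list := PySem.List.sorted key.toList (fun c => c)
  let built := key_list.foldl (fun (st : PySem.Dict Char (List Int) × Int) k =>
      let index := st.2 + 1
      if st.1.contains k then (st.1.modify k [] (fun l => l ++ [index]), index)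
      else (st.1.insert k [index], index)) (PySem.Dict.empty, -1)
  let mapper := built.1
  if return_list then
    -- result.append(mapper[a].pop()): every char of key is a key of mapper, pop() never fails
    (key.toList.foldl (fun (st : List Int × PySem.Dict Char (List Int)) a =>
        match PySem.List.pop? (st.2.getD a []) with
        | some (v, rest) => (st.1 ++ [v], st.2.insert a rest)
        | none => (st.1, st.2)) ([], mapper)).1
  else
    []  -- here the Python A returns a dict (not a list of ints); excluded by Pre_

-- ===== PORT B =====
-- smaller[a] = sum(1 for c in key if c < a), built once per distinct char of key
def bSmaller (cs : List Char) : PySem.Dict Char Int :=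
  (PySem.Set.ofList cs).foldl (fun (d : PySem.Dict Char Int) a =>
    d.insert a (cs.foldl (fun (s : Int) c => if c < a then s + 1 else s) 0)) PySem.Dict.empty

def parse_key_to_index_alt (key : String) (return_list : Bool) : List Int :=
  let cs := key.toList
  let rs := cs.reverse.foldl (fun (st : List Int × PySem.Dict Char Int) a =>
      let k := st.2.getD a 0
      (st.1 ++ [(bSmaller cs).getD a 0 + k], st.2.insert a (k + 1))) ([], PySem.Dict.empty)
  let ranks := rs.1.reverse
  if return_list then ranks
  else []  -- here the Python B returns a dict (not a list of ints); excluded by Pre_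

-- ===== PRECONDITION & SPEC =====
-- Pre_ excludes return_list = False, on which A RETURNS a dict rather than a list — a
-- value that is not representable under the required List Int signature.
def Pre_parse_key_to_index (key : String) (return_list : Bool) : Prop := return_list = true
instance (key : String) (return_list : Bool) : Decidable (Pre_parse_key_to_index key return_list) := by unfold Pre_parse_key_to_index; infer_instance
def pvWitness_parse_key_to_index : String × Bool := ("62ef0cf8", true)
def Spec_parse_key_to_index (key : String) (return_list : Bool) (out : List Int) : Prop := out = parse_key_to_index_alt key return_list
instance (key : String) (return_list : Bool) (out : List Int) : Decidable (Spec_parse_key_to_index key return_list out) := by unfold Spec_parse_key_to_index; infer_instance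

-- ===== CLAIM (what is proved, stated in full; the proofs are below) =====
def Claim_equal_parse_key_to_index : Prop := ∀ (key : String) (return_list : Bool), Dom_parse_key_to_index key return_list → Pre_parse_key_to_index key return_list → Spec_parse_key_to_index key return_list (parse_key_to_index key return_list)

-- ===== LEMMAS AND PROOFS =====

-- common spec: value at a position = start(char) + (# equal chars after it), recursively
def specL (start : Char → Nat) : List Char → List Int
  | [] => []
  | a :: t => ((start a + t.count a : Nat) : Int) :: specL start t

-- A's build loop: mapper[c] holds the enumeration indices of the occurrences of c
theorem build_getD (s : List Char) (d : PySem.Dict Char (List Int)) (i : Int) (c : Char) :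
    ((s.foldl (fun (st : PySem.Dict Char (List Int) × Int) k =>
        let index := st.2 + 1
        if st.1.contains k then (st.1.modify k [] (fun l => l ++ [index]), index)
        else (st.1.insert k [index], index)) (d, i)).1).getD c []
      = d.getD c [] ++ ((PySem.List.enumerate s (i + 1)).filter (fun p => p.2 == c)).map (·.1) := by
  induction s generalizing d i with
  | nil => simp [PySem.List.enumerate_nil]
  | cons k t ih =>
    rw [List.foldl_cons, PySem.List.enumerate_cons]
    by_cases hc : d.contains k
    · rw [if_pos hc, ih]
      rw [PySem.Dict.getD_modify]
      by_cases hkc : c = k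
      · subst hkc
        simp [List.append_assoc]
      · simp [hkc, (by simpa using Ne.symm hkc : (k == c) = false)]
    · rw [if_neg hc, ih]
      rw [PySem.Dict.getD_insert]
      by_cases hkc : c = k
      · subst hkc
        rw [PySem.Dict.getD_of_not_contains _ _ (by simpa using hc)]
        simp
      · simp [hkc, (by simpa using Ne.symm hkc : (k == c) = false)]

-- in a ≤-sorted list the indices of the occurrences of c form a contiguous block
theorem contig (s : List Char) (c : Char) (hs : s.Pairwise (· ≤ ·)) (z : Int) :
    ((PySem.List.enumerate s z).filter (fun p => p.2 == c)).map (·.1)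
      = (List.range (s.count c)).map (fun j => z + ((s.countP (fun d => decide (d < c)) + j : Nat) : Int)) := by
  induction hs generalizing z with
  | nil => simp [PySem.List.enumerate_nil]
  | @cons k t hall ht ih =>
    rw [PySem.List.enumerate_cons, List.filter_cons]
    rcases lt_trichotomy k c with hlt | heq | hgt
    · -- k < c : index z is dropped, countP gains one
      have hne : (k == c) = false := by simp [ne_of_lt hlt]
      rw [if_neg (by simp [hne]), ih]
      rw [List.count_cons_of_ne (by exact ne_of_lt hlt)]
      rw [List.countP_cons_of_pos (by simpa using hlt)]
      apply List.map_congr_left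
      intro j hj
      push_cast
      ring
    · -- k = c : index z is kept; nothing in t is < c
      subst heq
      have h0 : t.countP (fun d => decide (d < k)) = 0 := by
        rw [List.countP_eq_zero]
        intro b hb
        simp [not_lt.mpr (hall b hb)]
      have h0' : (k :: t).countP (fun d => decide (d < k)) = 0 := by
        rw [List.countP_cons_of_neg (by simp)]
        exact h0
      rw [if_pos (by simp), List.map_cons, ih, List.count_cons_self,
        List.range_succ_eq_map, List.map_cons, h0', h0]
      simp only [List.map_map]
      congr 1
      · simp
      apply List.map_congr_left
      intro j hj
      simp [Function.comp]
      ring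
    · -- c < k : no occurrence of c at all
      have hct : t.count c = 0 := by
        rw [List.count_eq_zero]
        intro hmem
        exact absurd (hall c hmem) (not_le.mpr hgt)
      have hne : (k == c) = false := by simp [(ne_of_lt hgt).symm]
      rw [if_neg (by simp [hne]), ih,
        List.count_cons_of_ne (by exact (ne_of_lt hgt).symm), hct]
      simp

-- A's pop loop: popping from the end of each contiguous block yields specL
theorem popLoop (u : List Char) (d : PySem.Dict Char (List Int)) (acc : List Int) (start : Char → Nat)
    (hd : ∀ c, d.getD c [] = (List.range (u.count c)).map (fun j => ((start c + j : Nat) : Int))) :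
    (u.foldl (fun (st : List Int × PySem.Dict Char (List Int)) a =>
        match PySem.List.pop? (st.2.getD a []) with
        | some (v, rest) => (st.1 ++ [v], st.2.insert a rest)
        | none => (st.1, st.2)) (acc, d)).1 = acc ++ specL start u := by
  induction u generalizing d acc with
  | nil => simp [specL]
  | cons a t ih =>
    rw [List.foldl_cons]
    have hcnt : (a :: t).count a = t.count a + 1 := List.count_cons_self ..
    have hsplit : d.getD a []
        = (List.range (t.count a)).map (fun j => ((start a + j : Nat) : Int))
          ++ [((start a + t.count a : Nat) : Int)] := by
      rw [hd a, hcnt, List.range_succ, List.map_append]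
      simp
    have hpop : PySem.List.pop? (d.getD a [])
        = some (((start a + t.count a : Nat) : Int),
                (List.range (t.count a)).map (fun j => ((start a + j : Nat) : Int))) := by
      rw [hsplit]
      exact PySem.List.pop?_last _ _
    simp only [hpop]
    rw [ih]
    · simp [specL]
    intro c
    by_cases hca : c = a
    · subst hca
      rw [PySem.Dict.getD_insert]
      simp
    · rw [PySem.Dict.getD_insert]
      rw [if_neg hca, hd c, List.count_cons_of_ne (fun h => hca h.symm)]

-- a fold of key-dependent inserts looks up to its value function
theorem insertMap_getD (l : List Char) (f : Char → Int) (d : PySem.Dict Char Int) (a : Char) :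
    (l.foldl (fun d c => d.insert c (f c)) d).getD a 0 = if a ∈ l then f a else d.getD a 0 := by
  induction l generalizing d with
  | nil => simp
  | cons c t ih =>
    rw [List.foldl_cons, ih]
    by_cases hat : a ∈ t
    · simp [hat]
    · rw [if_neg hat, PySem.Dict.getD_insert]
      by_cases hac : a = c
      · subst hac
        simp
      · simp [hac, hat]

-- bSmaller looks up to the number of strictly smaller characters
theorem bSmaller_getD (cs : List Char) (a : Char) (ha : a ∈ cs) :
    (bSmaller cs).getD a 0 = ((cs.countP (fun d => decide (d < a)) : Nat) : Int) := by
  unfold bSmaller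
  rw [insertMap_getD, if_pos ((PySem.Set.mem_ofList cs a).mpr ha)]
  rw [PySem.List.foldl_ite_add_one (fun c => c < a) cs 0]
  simp

-- B's right-to-left pass: ranks (reversed) are specL, and `seen` counts the processed suffix
theorem bLoop (sm : PySem.Dict Char Int) (start : Char → Nat) (u : List Char)
    (hsm : ∀ a ∈ u, sm.getD a 0 = (start a : Int)) :
    (u.reverse.foldl (fun (st : List Int × PySem.Dict Char Int) a =>
        let k := st.2.getD a 0
        (st.1 ++ [sm.getD a 0 + k], st.2.insert a (k + 1))) ([], PySem.Dict.empty)).1.reverse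
        = specL start u
    ∧ ∀ c, (u.reverse.foldl (fun (st : List Int × PySem.Dict Char Int) a =>
        let k := st.2.getD a 0
        (st.1 ++ [sm.getD a 0 + k], st.2.insert a (k + 1))) ([], PySem.Dict.empty)).2.getD c 0
        = (u.count c : Int) := by
  induction u with
  | nil => simp [specL, PySem.Dict.getD_empty]
  | cons a t ih =>
    obtain ⟨ih1, ih2⟩ := ih (fun b hb => hsm b (List.mem_cons_of_mem a hb))
    rw [List.reverse_cons, List.foldl_append, List.foldl_cons, List.foldl_nil]
    refine ⟨?_, ?_⟩
    · simp only [List.reverse_append, List.reverse_cons, List.reverse_nil, List.nil_append,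
        List.cons_append]
      rw [ih1, ih2 a, hsm a List.mem_cons_self, specL]
      norm_cast
    · intro c
      simp only [PySem.Dict.getD_insert]
      by_cases hca : c = a
      · subst hca
        rw [if_pos rfl, ih2 c, List.count_cons_self]
        push_cast
        ring
      · rw [if_neg hca, ih2 c, List.count_cons_of_ne (fun h => hca h.symm)]

-- ===== VERDICT (by name: the statement is the Claim_ definition above) =====
theorem parse_key_to_index_spec : Claim_equal_parse_key_to_index := by
  intro key return_list _ hpre
  unfold Spec_parse_key_to_index parse_key_to_index parse_key_to_index_alt
  subst hpre
  simp only [if_true]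
  rw [popLoop key.toList _ [] (fun c => key.toList.countP (fun d => decide (d < c)))]
  · rw [(bLoop (bSmaller key.toList) (fun c => key.toList.countP (fun d => decide (d < c)))
        key.toList (fun a ha => bSmaller_getD key.toList a ha)).1]
    simp
  intro c
  have hperm : (PySem.List.sorted key.toList (fun c => c)).Perm key.toList :=
    PySem.List.sorted_perm _ _ _
  rw [build_getD, contig _ c (PySem.List.sorted_pairwise key.toList (fun c => c)),
    hperm.count_eq, hperm.countP_eq]
  simp [PySem.Dict.getD_empty]
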